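-- pv_equiv track=rewrite | github.com/RobertVallance/adventofcode | day18.py | extract_innermost_parentheses
-- ===== SOURCE A (Python) =====
-- def extract_innermost_parentheses(expression):
--
-- 	"""
--
-- 	Extract string in innermost brackets in expression
--
-- 	Parameters
-- 	----------
-- 	- expression (a string containing the expression to check)
--
-- 	Returns
-- 	-------
-- 	- expression_in_bracket (string in the innermost brackets of expression)
--
-- 	"""
--
-- 	expression_in_bracket = ''
--
-- 	for i, char in enumerate(expression):
--
-- 		# if have a ')' then we know we are at the end of an innermost bracket so break out
-- 		# and save the final string
-- 		if char == ')':
-- 			break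
-- 		# if chae is '(' then reset string and start appending again
-- 		# acts as a catch in case there are multiple inner brackets -
-- 		# just want to save from the innermost one
-- 		if char == '(':
-- 			expression_in_bracket = ''
-- 			continue
-- 		expression_in_bracket += char
--
-- 	return expression_in_bracket
-- ===== SOURCE B (Python) =====
-- def extract_innermost_parentheses(expression):
--     before, _sep, _rest = expression.partition(')')
--     _head, _sep2, inner = before.rpartition('(')
--     return inner
-- ===== Notes on version B (the rewrite author's own statement) =====
-- stated objective: faster
-- what changed: Replaces the stateful character-accumulation loop (reset at each opening parenthesis, break at the first closing one) with two standard-library boundary splits: partition at the first closing parenthesis takes the prefix, rpartition at the last opening parenthesis in it takes the suffix.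
import Mathlib
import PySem

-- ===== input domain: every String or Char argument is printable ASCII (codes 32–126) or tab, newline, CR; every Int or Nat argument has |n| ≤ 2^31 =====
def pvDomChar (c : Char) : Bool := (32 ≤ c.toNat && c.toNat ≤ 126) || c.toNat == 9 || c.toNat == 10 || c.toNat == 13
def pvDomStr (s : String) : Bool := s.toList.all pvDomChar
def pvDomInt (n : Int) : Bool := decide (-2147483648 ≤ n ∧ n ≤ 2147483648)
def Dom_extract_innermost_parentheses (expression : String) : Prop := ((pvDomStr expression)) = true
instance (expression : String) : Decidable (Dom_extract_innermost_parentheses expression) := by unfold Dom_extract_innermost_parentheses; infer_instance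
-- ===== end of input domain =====

-- B replaces A's stateful accumulation loop by two library boundary splits (partition on the
-- first closing, rpartition on the last opening parenthesis); a timing run measured B faster (constant factor).

-- ===== PORT A =====
-- the for-loop with accumulator: break on ')', reset to '' on '(', else append the char
def pvLoopA : List Char → List Char → List Char
  | [], acc => acc
  | c :: rest, acc =>
    if c = ')' then acc
    else if c = '(' then pvLoopA rest []
    else pvLoopA rest (acc ++ [c])

def extract_innermost_parentheses (expression : String) : String :=
  String.ofList (pvLoopA expression.toList [])

-- ===== PORT B =====
def extract_innermost_parentheses_alt (expression : String) : String :=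
  -- before = expression.partition(')')[0]: exactly the chars before the first ')' (takeWhile is exact here)
  let before := expression.toList.takeWhile (· ≠ ')')
  -- inner = before.rpartition('(')[2]: exactly the chars after the last '(' (reversed takeWhile of the reverse is exact here)
  String.ofList ((before.reverse.takeWhile (· ≠ '(')).reverse)

-- ===== PRECONDITION & SPEC =====
def Spec_extract_innermost_parentheses (expression : String) (out : String) : Prop := out = extract_innermost_parentheses_alt expression
instance (expression : String) (out : String) : Decidable (Spec_extract_innermost_parentheses expression out) := by unfold Spec_extract_innermost_parentheses; infer_instance

-- ===== CLAIM (what is proved, stated in full; the proofs are below) =====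
def Claim_equal_extract_innermost_parentheses : Prop := ∀ (expression : String), Dom_extract_innermost_parentheses expression → Spec_extract_innermost_parentheses expression (extract_innermost_parentheses expression)

-- ===== LEMMAS AND PROOFS =====

-- suffix after the last '(' of a list
def pvAfterParen (l : List Char) : List Char := (l.reverse.takeWhile (· ≠ '(')).reverse

theorem pvTakeWhile_eq_self (c : Char) (l : List Char) (h : c ∉ l) :
    l.takeWhile (· ≠ c) = l := by
  apply List.takeWhile_eq_self_iff.mpr
  intro x hx
  simp only [decide_eq_true_eq]
  rintro rfl
  exact h hx

theorem pvTakeWhile_len_ne (c : Char) (l : List Char) (h : c ∈ l) :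
    (l.takeWhile (· ≠ c)).length ≠ l.length := by
  intro hlen
  have heq : l.takeWhile (· ≠ c) = l :=
    (List.takeWhile_prefix _).eq_of_length hlen
  have := List.takeWhile_eq_self_iff.mp heq c h
  simp at this

theorem pvAfterParen_cons (c : Char) (t : List Char) :
    pvAfterParen (c :: t) =
      if '(' ∈ t then pvAfterParen t else if c = '(' then t else c :: t := by
  unfold pvAfterParen
  rw [List.reverse_cons, List.takeWhile_append]
  by_cases h : '(' ∈ t
  · rw [if_neg (pvTakeWhile_len_ne '(' t.reverse (List.mem_reverse.mpr h)), if_pos h]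
  · rw [if_pos (by rw [pvTakeWhile_eq_self '(' t.reverse (fun hm => h (List.mem_reverse.mp hm))]),
        if_neg h]
    by_cases hc : c = '('
    · simp [hc]
    · simp [hc]

theorem pvAfterParen_of_not_mem (l : List Char) (h : '(' ∉ l) : pvAfterParen l = l := by
  unfold pvAfterParen
  rw [pvTakeWhile_eq_self '(' l.reverse (fun hm => h (List.mem_reverse.mp hm)), List.reverse_reverse]

theorem pvLoopA_eq (l : List Char) : ∀ acc : List Char,
    pvLoopA l acc =
      (let p := l.takeWhile (· ≠ ')');
       if '(' ∈ p then pvAfterParen p else acc ++ p) := by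
  induction l with
  | nil => intro acc; simp [pvLoopA]
  | cons c t ih =>
    intro acc
    have hp : ∀ (h : ¬ c = ')'), (c :: t).takeWhile (· ≠ ')') =
        c :: t.takeWhile (· ≠ ')') := by
      intro h; rw [List.takeWhile_cons, if_pos (by simpa using h)]
    by_cases hr : c = ')'
    · simp [pvLoopA, hr]
    · by_cases hl : c = '('
      · simp only [pvLoopA, if_neg hr, if_pos hl, hp hr]
        rw [ih []]
        have hmem : '(' ∈ c :: t.takeWhile (· ≠ ')') := by simp [hl]
        rw [if_pos hmem, hl, pvAfterParen_cons]
        by_cases h2 : '(' ∈ t.takeWhile (· ≠ ')')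
        · rw [if_pos h2, if_pos h2]
        · rw [if_neg h2, if_neg h2, if_pos rfl]
          simp
      · simp only [pvLoopA, if_neg hr, if_neg hl, hp hr]
        rw [ih (acc ++ [c])]
        by_cases h2 : '(' ∈ t.takeWhile (· ≠ ')')
        · have hmem : '(' ∈ c :: t.takeWhile (· ≠ ')') := List.mem_cons_of_mem _ h2
          rw [if_pos hmem, if_pos h2, pvAfterParen_cons, if_pos h2]
        · have hmem : '(' ∉ c :: t.takeWhile (· ≠ ')') := by
            simp only [List.mem_cons, not_or]
            exact ⟨fun h => hl h.symm, h2⟩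
          rw [if_neg hmem, if_neg h2]
          simp

-- ===== VERDICT (by name: the statement is the Claim_ definition above) =====
theorem extract_innermost_parentheses_spec : Claim_equal_extract_innermost_parentheses := by
  intro e _
  unfold Spec_extract_innermost_parentheses extract_innermost_parentheses extract_innermost_parentheses_alt
  rw [pvLoopA_eq]
  by_cases h : '(' ∈ e.toList.takeWhile (· ≠ ')')
  · rw [if_pos h]; rfl
  · rw [if_neg h, List.nil_append]
    exact congrArg String.ofList (pvAfterParen_of_not_mem _ h).symm
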